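-- pv_equiv track=rewrite | github.com/db-Lee/iclr2026-5078 | multigenprm/data/preprocess_noisy_data.py | get_prm_label
-- ===== SOURCE A (Python) =====
-- def normalize_process_labels(labels):
--     if not labels:
--         return []
--     normalized = labels.copy()
--     first_error_pos = next((i for i, label in enumerate(labels) if label == -1), len(labels))
--     for i in range(first_error_pos):
--         normalized[i] = 1
--     for i in range(first_error_pos, len(normalized)):
--         normalized[i] = -1
--     return normalized
--
-- def get_prm_label(data):
--     full_labels = normalize_process_labels(data["labels"])
--     label = []
--     for l in full_labels:
--         label.append(l)
--         if l == -1: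
--             break
--     return label
-- ===== SOURCE B (Python) =====
-- def get_prm_label(data):
--     labels = data["labels"]
--     first = next((i for i, l in enumerate(labels) if l == -1), None)
--     if first is None:
--         return [1] * len(labels)
--     return [1] * first + [-1]
-- ===== Notes on version B (the rewrite author's own statement) =====
-- stated objective: simpler
-- what changed: B drops the normalize-then-truncate pipeline (copy, two index loops, a collecting loop with break) and builds the answer directly from the index of the first -1: [1]*first + [-1], or [1]*len(labels) when there is none.
import Mathlib
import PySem

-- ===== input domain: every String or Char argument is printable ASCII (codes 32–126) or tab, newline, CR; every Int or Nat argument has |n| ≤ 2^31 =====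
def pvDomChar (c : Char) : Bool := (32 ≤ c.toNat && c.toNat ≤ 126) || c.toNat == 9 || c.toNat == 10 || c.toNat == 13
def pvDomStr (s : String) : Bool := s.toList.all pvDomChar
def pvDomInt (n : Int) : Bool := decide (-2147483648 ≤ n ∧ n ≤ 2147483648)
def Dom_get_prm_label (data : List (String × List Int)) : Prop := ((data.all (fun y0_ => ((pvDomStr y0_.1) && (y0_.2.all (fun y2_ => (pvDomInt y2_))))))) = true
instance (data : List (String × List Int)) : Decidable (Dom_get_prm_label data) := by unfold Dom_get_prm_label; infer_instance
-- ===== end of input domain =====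

-- B replaces A's normalize-then-truncate pipeline by a closed form built from the
-- index of the first -1 (simpler; return value only, A does not mutate its input).

-- ===== PORT A =====
-- data["labels"]: first-match lookup in the association list (Pre_ guarantees the key exists)
def pvLabels (data : List (String × List Int)) : List Int :=
  ((data.find? (fun p => p.1 == "labels")).map (·.2)).getD []

def normalize_process_labels (labels : List Int) : List Int :=
  if labels = [] then []
  else
    let firstErrorPos : Int :=
      match (PySem.List.enumerate labels 0).find? (fun p => p.2 == -1) with
      | some p => p.1
      | none => PySem.List.len labels
    let normalized := (PySem.List.pyRange 0 firstErrorPos 1).foldl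
      (fun acc i => acc.set i.toNat 1) labels
    (PySem.List.pyRange firstErrorPos (PySem.List.len labels) 1).foldl
      (fun acc i => acc.set i.toNat (-1)) normalized

-- the collecting loop with break
def pvCollect : List Int → List Int
  | [] => []
  | l :: rest => if l == -1 then [l] else l :: pvCollect rest

def get_prm_label (data : List (String × List Int)) : List Int :=
  pvCollect (normalize_process_labels (pvLabels data))

-- ===== PORT B =====
def get_prm_label_alt (data : List (String × List Int)) : List Int :=
  let labels := ((data.find? (fun p => p.1 == "labels")).map (·.2)).getD []
  match labels.findIdx? (· == -1) with
  | none => List.replicate labels.length 1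
  | some k => List.replicate k 1 ++ [-1]

-- ===== PRECONDITION & SPEC =====
-- Pre_ excludes exactly the dicts without a "labels" key, where both Pythons raise KeyError.
def Pre_get_prm_label (data : List (String × List Int)) : Prop :=
  (data.any (fun p => p.1 == "labels")) = true
instance (data : List (String × List Int)) : Decidable (Pre_get_prm_label data) := by
  unfold Pre_get_prm_label; infer_instance

def pvWitness_get_prm_label : (List (String × List Int)) := [("labels", [1, -1, 1])]

def Spec_get_prm_label (data : List (String × List Int)) (out : List Int) : Prop := out = get_prm_label_alt data
instance (data : List (String × List Int)) (out : List Int) : Decidable (Spec_get_prm_label data out) := by unfold Spec_get_prm_label; infer_instance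

-- ===== CLAIM (what is proved, stated in full; the proofs are below) =====
def Claim_equal_get_prm_label : Prop := ∀ (data : List (String × List Int)), Dom_get_prm_label data → Pre_get_prm_label data → Spec_get_prm_label data (get_prm_label data)

-- ===== LEMMAS AND PROOFS =====

-- A's enumerate-find computes the same index as B's findIdx?
lemma enum_find_eq (labels : List Int) (s : Int) :
    ((PySem.List.enumerate labels s).find? (fun p => p.2 == -1)).map (·.1)
      = (labels.findIdx? (· == -1)).map (fun k => s + (k : Int)) := by
  induction labels generalizing s with
  | nil => simp [PySem.List.enumerate_nil]
  | cons x rest ih =>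
    rw [PySem.List.enumerate_cons]
    by_cases hx : x = -1
    · simp [hx, List.findIdx?_cons]
    · simp only [List.find?_cons, List.findIdx?_cons]
      have hx' : (x == -1) = false := by simp [hx]
      simp only [hx']
      rw [ih (s + 1)]
      cases List.findIdx? (fun x => x == -1) rest
      · simp
      · simp; ring

-- setting indices a, a+1, …, a+m-1 to v
lemma foldl_set_block (v : Int) (m : ℕ) : ∀ (xs : List Int) (a : ℕ), a + m ≤ xs.length →
    (List.range m).foldl (fun acc k => acc.set (a + k) v) xs
      = xs.take a ++ List.replicate m v ++ xs.drop (a + m) := by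
  induction m with
  | zero => intro xs a h; simp
  | succ m ih =>
    intro xs a h
    rw [List.range_succ, List.foldl_append, ih xs a (by omega)]
    simp only [List.foldl_cons, List.foldl_nil]
    have hlen : (xs.take a ++ List.replicate m v).length = a + m := by
      simp [List.length_take, Nat.min_eq_left (by omega : a ≤ xs.length)]
    rw [List.set_append_right _ _ (by omega), hlen,
      Nat.sub_self, List.drop_eq_getElem_cons (by omega : a + m < xs.length),
      List.set_cons_zero]
    simp only [List.replicate_succ' (n := m), List.append_assoc, List.cons_append,
      List.nil_append]
    rw [show a + (m + 1) = a + m + 1 by omega]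

lemma collect_ones (k : ℕ) (rest : List Int) :
    pvCollect (List.replicate k 1 ++ rest)
      = List.replicate k 1 ++ pvCollect rest := by
  induction k with
  | zero => simp
  | succ k ih => simpa [List.replicate_succ, pvCollect] using ih

lemma main_lemma (labels : List Int) :
    pvCollect (normalize_process_labels labels)
      = (match labels.findIdx? (· == -1) with
         | none => List.replicate labels.length 1
         | some k => List.replicate k 1 ++ [-1]) := by
  by_cases hnil : labels = []
  · subst hnil; simp [normalize_process_labels, pvCollect]
  · have hf := enum_find_eq labels 0
    rw [normalize_process_labels, if_neg hnil]
    cases hIdx : labels.findIdx? (· == -1) with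
    | none =>
      rw [hIdx] at hf
      have hfind : (PySem.List.enumerate labels 0).find? (fun p => p.2 == -1) = none := by
        cases h : (PySem.List.enumerate labels 0).find? (fun p => p.2 == -1) <;>
          simp [h] at hf ⊢
      simp only [hfind, PySem.List.len_eq,
        PySem.List.pyRange_one_eq_nil (le_refl (labels.length : Int)), List.foldl_nil]
      rw [PySem.List.pyRange_one, List.foldl_map]
      simp only [zero_add, Int.toNat_natCast]
      rw [show ((labels.length : Int) - 0).toNat = labels.length by omega]
      have := foldl_set_block 1 labels.length labels 0 (by omega)
      simp only [zero_add] at this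
      rw [this]
      simp only [List.take_zero, List.nil_append, List.drop_length, List.append_nil]
      simpa [pvCollect] using collect_ones labels.length []
    | some k =>
      rw [hIdx] at hf
      have hk : k < labels.length := (List.findIdx?_eq_some_iff_findIdx_eq.mp hIdx).1
      obtain ⟨p, hp, hp1⟩ := Option.map_eq_some_iff.mp hf
      rw [hp]
      simp only [hp1, zero_add]
      -- first loop: indices 0..k-1 set to 1
      rw [PySem.List.pyRange_one, List.foldl_map]
      simp only [zero_add, Int.toNat_natCast]
      rw [show ((k : Int) - 0).toNat = k by omega]
      have h1 := foldl_set_block 1 k labels 0 (by omega)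
      simp only [zero_add] at h1
      rw [h1]
      -- second loop: indices k..len-1 set to -1
      set xs' : List Int := labels.take 0 ++ List.replicate k 1 ++ labels.drop k with hxs'
      have hxlen : xs'.length = labels.length := by
        simp [hxs']; omega
      rw [PySem.List.len_eq, PySem.List.pyRange_one, List.foldl_map]
      rw [show ((labels.length : Int) - (k : Int)).toNat = labels.length - k by omega]
      have hcast : ∀ (acc : List Int) (j : Nat),
          acc.set ((k : Int) + (j : Int)).toNat (-1) = acc.set (k + j) (-1) := by
        intro acc j
        rw [show ((k : Int) + (j : Int)).toNat = k + j by omega]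
      simp only [hcast]
      have h2 := foldl_set_block (-1) (labels.length - k) xs' k (by omega)
      rw [h2]
      have htake : xs'.take k = List.replicate k 1 := by
        simp only [hxs', List.take_zero, List.nil_append]
        exact List.take_left' (by simp)
      have hdrop : xs'.drop (k + (labels.length - k)) = [] := by
        apply List.drop_eq_nil_of_le; omega
      rw [htake, hdrop, List.append_nil, collect_ones]
      obtain ⟨m, hm⟩ : ∃ m, labels.length - k = m + 1 := ⟨labels.length - k - 1, by omega⟩
      rw [hm, List.replicate_succ]
      simp [pvCollect]

-- ===== VERDICT (by name: the statement is the Claim_ definition above) =====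
theorem get_prm_label_spec : Claim_equal_get_prm_label := by
  intro data _ _
  show _ = _
  rw [get_prm_label, get_prm_label_alt, pvLabels, main_lemma]
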